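-- pv_equiv track=rewrite | github.com/Gennady-A/ACMP_Full | 0297/0297.py | countOfKruglyashi
-- ===== SOURCE A (Python) =====
-- def countOfKruglyashi(n):
--     sum = 0
--     for i in n:
--         if i == '0' or i == '9' or i == '6':
--             sum += 1
--         elif i == '8':
--             sum += 2
--     return sum
-- ===== SOURCE B (Python) =====
-- def countOfKruglyashi(n):
--     return n.count('0') + n.count('6') + n.count('9') + 2 * n.count('8')
-- ===== Notes on version B (the rewrite author's own statement) =====
-- stated objective: idiomatic
-- what changed: Replaces the single accumulating loop over characters with a closed return expression of four str.count scans (one per loop-forming digit, with '8' weighted twice), removing the mutable accumulator and the branch chain.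
import Mathlib
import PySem

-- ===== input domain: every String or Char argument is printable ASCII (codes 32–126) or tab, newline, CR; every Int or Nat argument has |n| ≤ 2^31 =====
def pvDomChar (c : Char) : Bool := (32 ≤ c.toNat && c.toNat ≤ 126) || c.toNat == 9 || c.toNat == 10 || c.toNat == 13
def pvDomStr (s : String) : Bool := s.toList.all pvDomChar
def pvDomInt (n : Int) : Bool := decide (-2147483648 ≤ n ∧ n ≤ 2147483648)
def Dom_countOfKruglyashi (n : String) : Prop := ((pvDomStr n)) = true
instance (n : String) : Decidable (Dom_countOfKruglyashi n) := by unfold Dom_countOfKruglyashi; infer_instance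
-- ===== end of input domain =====

-- B replaces A's accumulating branch loop with a closed expression of four str.count scans (idiomatic; same cost class).

-- ===== PORT A =====
-- literal port of A's loop: one fold over the characters maintaining the running sum
def countOfKruglyashi (n : String) : Int :=
  n.toList.foldl (fun sum i =>
    if i = '0' ∨ i = '9' ∨ i = '6' then sum + 1
    else if i = '8' then sum + 2
    else sum) 0

-- ===== PORT B =====
-- literal port of Source B: four str.count scans combined in one return expression
def countOfKruglyashi_alt (n : String) : Int :=
  (PySem.Str.count n "0" : Int) + (PySem.Str.count n "6" : Int)
    + (PySem.Str.count n "9" : Int) + 2 * (PySem.Str.count n "8" : Int)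

-- ===== PRECONDITION & SPEC =====
def Spec_countOfKruglyashi (n : String) (out : Int) : Prop := out = countOfKruglyashi_alt n
instance (n : String) (out : Int) : Decidable (Spec_countOfKruglyashi n out) := by unfold Spec_countOfKruglyashi; infer_instance

-- ===== CLAIM (what is proved, stated in full; the proofs are below) =====
def Claim_equal_countOfKruglyashi : Prop := ∀ (n : String), Dom_countOfKruglyashi n → Spec_countOfKruglyashi n (countOfKruglyashi n)

-- ===== LEMMAS AND PROOFS =====

-- Chars.count.go with a single-character needle and enough fuel counts that character.
theorem count_go_singleton (c : Char) : ∀ (fuel : Nat) (l : List Char) (acc : Nat),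
    l.length ≤ fuel → PySem.Chars.count.go [c] fuel l acc = acc + l.count c := by
  intro fuel
  induction fuel with
  | zero =>
    intro l acc h
    have : l = [] := List.eq_nil_of_length_eq_zero (Nat.le_zero.mp h)
    subst this
    simp [PySem.Chars.count.go]
  | succ f ih =>
    intro l acc h
    cases l with
    | nil => simp [PySem.Chars.count.go]
    | cons x t =>
      simp only [PySem.Chars.count.go]
      by_cases hx : x = c
      · subst hx
        simp only [List.isPrefixOf, beq_self_eq_true, Bool.true_and, if_true, List.length_singleton, List.drop_succ_cons, List.drop_zero]
        rw [ih t (acc + 1) (by simpa using Nat.lt_succ_iff.mp (by simpa using h))]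
        simp
        omega
      · have : ([c].isPrefixOf (x :: t)) = false := by
          simp [List.isPrefixOf]
          exact fun hxc => hx hxc.symm
        rw [this]
        simp only [if_false, Bool.false_eq_true]
        rw [ih t acc (by simpa using Nat.lt_succ_iff.mp (by simpa using h))]
        simp [hx]

theorem count_singleton (s : List Char) (c : Char) :
    PySem.Chars.count s [c] = s.count c := by
  simp only [PySem.Chars.count, List.isEmpty_cons, if_false, Bool.false_eq_true]
  simpa using count_go_singleton c s.length s 0 (le_refl _)

-- A's fold, with a general accumulator, is the weighted sum of the four counts.
theorem foldA_eq (l : List Char) : ∀ (a : Int),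
    l.foldl (fun sum i =>
      if i = '0' ∨ i = '9' ∨ i = '6' then sum + 1
      else if i = '8' then sum + 2
      else sum) a
    = a + (l.count '0' : Int) + (l.count '6' : Int) + (l.count '9' : Int) + 2 * (l.count '8' : Int) := by
  induction l with
  | nil => intro a; simp
  | cons x t ih =>
    intro a
    rw [List.foldl_cons]
    by_cases h0 : x = '0'
    · subst h0
      rw [ih]
      push_cast [List.count_cons]
      simp
      ring
    · by_cases h9 : x = '9'
      · subst h9
        rw [ih]
        push_cast [List.count_cons]
        simp
        ring
      · by_cases h6 : x = '6'
        · subst h6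
          rw [ih]
          push_cast [List.count_cons]
          simp
          ring
        · by_cases h8 : x = '8'
          · subst h8
            rw [if_neg (by simp), if_pos rfl, ih]
            push_cast [List.count_cons]
            simp
            ring
          · rw [if_neg (by tauto), if_neg h8, ih]
            push_cast [List.count_cons]
            simp [h0, h6, h9, h8]

-- ===== VERDICT (by name: the statement is the Claim_ definition above) =====
theorem countOfKruglyashi_spec : Claim_equal_countOfKruglyashi := by
  intro n _
  show countOfKruglyashi n = countOfKruglyashi_alt n
  unfold countOfKruglyashi countOfKruglyashi_alt
  rw [foldA_eq]
  simp only [PySem.Str.count_eq]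
  have h0 := count_singleton n.toList '0'
  have h6 := count_singleton n.toList '6'
  have h9 := count_singleton n.toList '9'
  have h8 := count_singleton n.toList '8'
  have t0 : ("0" : String).toList = ['0'] := rfl
  have t6 : ("6" : String).toList = ['6'] := rfl
  have t9 : ("9" : String).toList = ['9'] := rfl
  have t8 : ("8" : String).toList = ['8'] := rfl
  rw [t0, t6, t9, t8, h0, h6, h9, h8]
  ring
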